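-- pv_equiv track=rewrite | github.com/deluair/MaritimeFlow | animated_strait_demo.py | _decode_vessel_type
-- ===== SOURCE A (Python) =====
-- def _decode_vessel_type(ship_type: int) -> str:
--     """Decode AIS vessel type code to readable type"""
--     type_mapping = {
--         range(30, 40): 'fishing',
--         range(40, 50): 'high_speed_craft',
--         range(60, 70): 'passenger',
--         range(70, 80): 'cargo',
--         range(80, 90): 'tanker',
--         range(90, 100): 'other'
--     }
--
--     for type_range, vessel_type in type_mapping.items():
--         if ship_type in type_range:
--             return vessel_type
--
--     return 'unknown'
-- ===== SOURCE B (Python) =====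
-- _TENS_TO_TYPE = {3: 'fishing', 4: 'high_speed_craft', 6: 'passenger',
--                  7: 'cargo', 8: 'tanker', 9: 'other'}
--
-- def _decode_vessel_type(ship_type: int) -> str:
--     """Decode AIS vessel type code to readable type"""
--     return _TENS_TO_TYPE.get(ship_type // 10, 'unknown')
-- ===== Notes on version B (the rewrite author's own statement) =====
-- stated objective: idiomatic
-- what changed: Replaces the loop over six range objects with a single floor division computing the tens digit and one dict lookup on it; codes outside the table, including negatives (which floor to negative keys), fall through to the default.
import Mathlib
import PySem

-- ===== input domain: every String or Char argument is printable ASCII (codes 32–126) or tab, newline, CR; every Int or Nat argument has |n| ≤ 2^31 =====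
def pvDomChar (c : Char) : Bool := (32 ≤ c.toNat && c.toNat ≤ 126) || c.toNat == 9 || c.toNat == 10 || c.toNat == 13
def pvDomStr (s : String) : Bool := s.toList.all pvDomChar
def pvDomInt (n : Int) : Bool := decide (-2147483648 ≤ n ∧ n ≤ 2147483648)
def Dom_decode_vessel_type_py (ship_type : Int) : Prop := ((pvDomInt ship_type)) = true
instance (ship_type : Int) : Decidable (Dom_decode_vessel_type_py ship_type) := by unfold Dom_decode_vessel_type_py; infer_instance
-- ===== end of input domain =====

-- B replaces A's scan over six range objects by one floor division (tens digit) and one dict lookup (idiomatic; same cost).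

-- ===== PORT A =====
-- A iterates over the dict of (range, name) pairs in insertion order; 'x in range(a,b)' is the test a ≤ x < b.
def decodeLoopA (ship_type : Int) : List ((Int × Int) × String) → String
  | [] => "unknown"
  | ((lo, hi), v) :: rest =>
      if lo ≤ ship_type ∧ ship_type < hi then v else decodeLoopA ship_type rest

def decode_vessel_type_py (ship_type : Int) : String :=
  decodeLoopA ship_type
    [((30, 40), "fishing"), ((40, 50), "high_speed_craft"), ((60, 70), "passenger"),
     ((70, 80), "cargo"), ((80, 90), "tanker"), ((90, 100), "other")]

-- ===== PORT B =====
def tensToType : PySem.Dict Int String :=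
  PySem.Dict.mk [(3, "fishing"), (4, "high_speed_craft"), (6, "passenger"),
   (7, "cargo"), (8, "tanker"), (9, "other")]

def decode_vessel_type_py_alt (ship_type : Int) : String :=
  PySem.Dict.getD tensToType (PySem.Int.floordiv ship_type 10) "unknown"

-- ===== PRECONDITION & SPEC =====
def Spec_decode_vessel_type_py (ship_type : Int) (out : String) : Prop := out = decode_vessel_type_py_alt ship_type
instance (ship_type : Int) (out : String) : Decidable (Spec_decode_vessel_type_py ship_type out) := by unfold Spec_decode_vessel_type_py; infer_instance

-- ===== CLAIM (what is proved, stated in full; the proofs are below) =====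
def Claim_equal_decode_vessel_type_py : Prop := ∀ (ship_type : Int), Dom_decode_vessel_type_py ship_type → Spec_decode_vessel_type_py ship_type (decode_vessel_type_py ship_type)

-- ===== LEMMAS AND PROOFS =====

theorem decode_eq (x : Int) : decode_vessel_type_py x = decode_vessel_type_py_alt x := by
  have hfd : PySem.Int.floordiv x 10 = x / 10 :=
    PySem.Int.floordiv_eq_ediv_of_pos (by omega)
  unfold decode_vessel_type_py decode_vessel_type_py_alt
  rw [hfd]
  by_cases h3 : 30 ≤ x ∧ x < 40
  · rw [show x / 10 = 3 by omega]; simp [decodeLoopA, h3]; rfl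
  by_cases h4 : 40 ≤ x ∧ x < 50
  · rw [show x / 10 = 4 by omega]; simp [decodeLoopA, h3, h4]; rfl
  by_cases h6 : 60 ≤ x ∧ x < 70
  · rw [show x / 10 = 6 by omega]; simp [decodeLoopA, h3, h4, h6]; rfl
  by_cases h7 : 70 ≤ x ∧ x < 80
  · rw [show x / 10 = 7 by omega]; simp [decodeLoopA, h3, h4, h6, h7]; rfl
  by_cases h8 : 80 ≤ x ∧ x < 90
  · rw [show x / 10 = 8 by omega]; simp [decodeLoopA, h3, h4, h6, h7, h8]; rfl
  by_cases h9 : 90 ≤ x ∧ x < 100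
  · rw [show x / 10 = 9 by omega]; simp [decodeLoopA, h3, h4, h6, h7, h8, h9]; rfl
  · simp only [decodeLoopA, if_neg h3, if_neg h4, if_neg h6, if_neg h7, if_neg h8, if_neg h9]
    simp [tensToType, PySem.Dict.getD, PySem.Dict.get?, PySem.Dict.get?_mk_cons,
      show ((3:Int) == x / 10) = false by simp; omega,
      show ((4:Int) == x / 10) = false by simp; omega,
      show ((6:Int) == x / 10) = false by simp; omega,
      show ((7:Int) == x / 10) = false by simp; omega,
      show ((8:Int) == x / 10) = false by simp; omega,
      show ((9:Int) == x / 10) = false by simp; omega]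

-- ===== VERDICT (by name: the statement is the Claim_ definition above) =====
theorem decode_vessel_type_py_spec : Claim_equal_decode_vessel_type_py := by
  intro x _
  unfold Spec_decode_vessel_type_py
  exact decode_eq x
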